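-- pv_equiv track=rewrite | github.com/AllianceSoftware/alliance-platform-py | packages/ap-frontend/alliance_platform/frontend/util.py | _split_css_declarations
-- ===== SOURCE A (Python) =====
-- def _split_css_declarations(style: str) -> list[str]:
--     declarations = []
--     current = []
--     quote: str | None = None
--     escaped = False
--     paren_depth = 0
--
--     for char in style:
--         if quote:
--             current.append(char)
--             if escaped:
--                 escaped = False
--             elif char == "\\":
--                 escaped = True
--             elif char == quote:
--                 quote = None
--             continue
--
--         if char in {"'", '"'}:
--             quote = char
--             current.append(char)
--             continue
--         if char == "(":
--             paren_depth += 1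
--             current.append(char)
--             continue
--         if char == ")" and paren_depth > 0:
--             paren_depth -= 1
--             current.append(char)
--             continue
--         if char == ";" and paren_depth == 0:
--             declarations.append("".join(current))
--             current = []
--             continue
--         current.append(char)
--
--     declarations.append("".join(current))
--     return declarations
-- ===== SOURCE B (Python) =====
-- def _split_css_declarations(style: str) -> list[str]:
--     declarations = []
--     buf = []
--     paren_depth = 0
--     i = 0
--     n = len(style)
--     while i < n:
--         ch = style[i]
--         if ch in ("'", '"'):
--             buf.append(ch)
--             i += 1
--             while i < n:
--                 c = style[i]
--                 buf.append(c)
--                 i += 1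
--                 if c == "\\":
--                     if i < n:
--                         buf.append(style[i])
--                         i += 1
--                 elif c == ch:
--                     break
--             continue
--         if ch == "(":
--             paren_depth += 1
--             buf.append(ch)
--         elif ch == ")" and paren_depth > 0:
--             paren_depth -= 1
--             buf.append(ch)
--         elif ch == ";" and paren_depth == 0:
--             declarations.append("".join(buf))
--             buf = []
--         else:
--             buf.append(ch)
--         i += 1
--     declarations.append("".join(buf))
--     return declarations
-- ===== Notes on version B (the rewrite author's own statement) =====
-- stated objective: alternative
-- what changed: Replaces the flat per-character state machine with persistent quote/escaped flags by an index-driven token-consuming scanner: quoted sections (with backslash escapes handled by consuming two characters at once) are swallowed by a dedicated inner loop, so the outer loop keeps only the paren depth and buffer.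
import Mathlib
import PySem

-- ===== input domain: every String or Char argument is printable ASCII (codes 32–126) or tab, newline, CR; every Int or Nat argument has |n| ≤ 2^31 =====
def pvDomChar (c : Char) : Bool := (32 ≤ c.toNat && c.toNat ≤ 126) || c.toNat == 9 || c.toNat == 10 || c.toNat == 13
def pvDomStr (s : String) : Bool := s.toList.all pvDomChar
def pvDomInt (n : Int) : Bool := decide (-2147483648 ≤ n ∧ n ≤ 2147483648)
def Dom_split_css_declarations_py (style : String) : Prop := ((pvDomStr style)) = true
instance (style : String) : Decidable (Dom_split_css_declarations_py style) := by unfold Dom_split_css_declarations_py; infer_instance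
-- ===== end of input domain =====

-- B rewrites A's flat per-character state machine (persistent quote/escaped flags) as a
-- token-consuming scanner whose inner loop swallows each quoted section whole (alternative decomposition).

-- ===== PORT A =====
-- state: (declarations, current, quote, escaped, paren_depth)
def pvAStep (st : List String × List Char × Option Char × Bool × Int) (c : Char) :
    List String × List Char × Option Char × Bool × Int :=
  match st with
  | (decls, cur, quote, escaped, depth) =>
    match quote with
    | some q =>
      let cur := cur ++ [c]
      if escaped then (decls, cur, some q, false, depth)
      else if c = '\\' then (decls, cur, some q, true, depth)
      else if c = q then (decls, cur, none, false, depth)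
      else (decls, cur, some q, escaped, depth)
    | none =>
      if c = '\'' ∨ c = '"' then (decls, cur ++ [c], some c, escaped, depth)
      else if c = '(' then (decls, cur ++ [c], none, escaped, depth + 1)
      else if c = ')' ∧ depth > 0 then (decls, cur ++ [c], none, escaped, depth - 1)
      else if c = ';' ∧ depth = 0 then (decls ++ [String.ofList cur], [], none, escaped, depth)
      else (decls, cur ++ [c], none, escaped, depth)

def split_css_declarations_py (style : String) : List String :=
  let st := style.toList.foldl pvAStep ([], [], none, false, (0 : Int))
  st.1 ++ [String.ofList st.2.1]

-- ===== PORT B =====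
-- inner scanner: consumes a quoted section opened by q (a backslash consumes the next
-- character too); returns (new buffer, remaining input)
def pvBQuote (q : Char) (cs : List Char) (buf : List Char) : List Char × List Char :=
  match cs with
  | [] => (buf, [])
  | c :: rest =>
    if c = '\\' then
      match rest with
      | [] => (buf ++ [c], [])
      | c2 :: rest2 => pvBQuote q rest2 (buf ++ [c, c2])
    else if c = q then (buf ++ [c], rest)
    else pvBQuote q rest (buf ++ [c])

-- needed by pvBOuter's termination proof
theorem pvBQuote_rest_le (q : Char) (cs : List Char) (buf : List Char) :
    (pvBQuote q cs buf).2.length ≤ cs.length := by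
  induction cs, buf using pvBQuote.induct q with
  | case1 buf => simp [pvBQuote]
  | case2 buf => simp [pvBQuote]
  | case3 buf c2 rest2 ih =>
    have h : pvBQuote q ('\\' :: c2 :: rest2) buf = pvBQuote q rest2 (buf ++ ['\\', c2]) := by
      rw [pvBQuote]; simp
    rw [h]; simp only [List.length_cons]; omega
  | case4 buf rest2 h =>
    have h2 : pvBQuote q (q :: rest2) buf = (buf ++ [q], rest2) := by
      rw [pvBQuote.eq_def]; simp [h]
    rw [h2]; simp
  | case5 buf c2 rest2 h1 h2 ih =>
    have h3 : pvBQuote q (c2 :: rest2) buf = pvBQuote q rest2 (buf ++ [c2]) := by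
      rw [pvBQuote.eq_def]; simp [h1, h2]
    rw [h3]; simp only [List.length_cons]; omega

def pvBOuter (cs : List Char) (depth : Int) (buf : List Char) (decls : List String) :
    List String :=
  match cs with
  | [] => decls ++ [String.ofList buf]
  | c :: rest =>
    if c = '\'' ∨ c = '"' then
      let p := pvBQuote c rest (buf ++ [c])
      pvBOuter p.2 depth p.1 decls
    else if c = '(' then pvBOuter rest (depth + 1) (buf ++ [c]) decls
    else if c = ')' ∧ depth > 0 then pvBOuter rest (depth - 1) (buf ++ [c]) decls
    else if c = ';' ∧ depth = 0 then pvBOuter rest depth [] (decls ++ [String.ofList buf])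
    else pvBOuter rest depth (buf ++ [c]) decls
termination_by cs.length
decreasing_by
  · exact Nat.lt_succ_of_le (pvBQuote_rest_le _ _ _)
  all_goals simp

def split_css_declarations_py_alt (style : String) : List String :=
  pvBOuter style.toList 0 [] []

-- ===== PRECONDITION & SPEC =====
def Spec_split_css_declarations_py (style : String) (out : List String) : Prop := out = split_css_declarations_py_alt style
instance (style : String) (out : List String) : Decidable (Spec_split_css_declarations_py style out) := by unfold Spec_split_css_declarations_py; infer_instance

-- ===== CLAIM (what is proved, stated in full; the proofs are below) =====
def Claim_equal_split_css_declarations_py : Prop := ∀ (style : String), Dom_split_css_declarations_py style → Spec_split_css_declarations_py style (split_css_declarations_py style)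

-- ===== LEMMAS AND PROOFS =====
def pvFin (st : List String × List Char × Option Char × Bool × Int) : List String :=
  st.1 ++ [String.ofList st.2.1]

-- A's fold from an open-quote (unescaped) state equals consuming the section with pvBQuote
theorem pvQuoteLemma (q : Char) (cs : List Char) (buf : List Char) (decls : List String)
    (depth : Int) :
    pvFin (cs.foldl pvAStep (decls, buf, some q, false, depth)) =
      pvFin ((pvBQuote q cs buf).2.foldl pvAStep
        (decls, (pvBQuote q cs buf).1, none, false, depth)) := by
  induction cs, buf using pvBQuote.induct q with
  | case1 buf => simp [pvBQuote, pvFin]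
  | case2 buf => simp [pvBQuote, pvAStep, pvFin]
  | case3 buf c2 rest2 ih =>
    have h : pvBQuote q ('\\' :: c2 :: rest2) buf = pvBQuote q rest2 (buf ++ ['\\', c2]) := by
      rw [pvBQuote]; simp
    rw [h, List.foldl_cons, List.foldl_cons]
    have h1 : pvAStep (decls, buf, some q, false, depth) '\\' =
        (decls, buf ++ ['\\'], some q, true, depth) := by simp [pvAStep]
    have h2 : pvAStep (decls, buf ++ ['\\'], some q, true, depth) c2 =
        (decls, buf ++ ['\\', c2], some q, false, depth) := by simp [pvAStep]
    rw [h1, h2]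
    exact ih
  | case4 buf rest2 h =>
    have h2 : pvBQuote q (q :: rest2) buf = (buf ++ [q], rest2) := by
      rw [pvBQuote.eq_def]; simp [h]
    rw [h2, List.foldl_cons]
    have h3 : pvAStep (decls, buf, some q, false, depth) q =
        (decls, buf ++ [q], none, false, depth) := by simp [pvAStep, h]
    rw [h3]
  | case5 buf c2 rest2 h1 h2 ih =>
    have h3 : pvBQuote q (c2 :: rest2) buf = pvBQuote q rest2 (buf ++ [c2]) := by
      rw [pvBQuote.eq_def]; simp [h1, h2]
    rw [h3, List.foldl_cons]
    have h4 : pvAStep (decls, buf, some q, false, depth) c2 =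
        (decls, buf ++ [c2], some q, false, depth) := by simp [pvAStep, h1, h2]
    rw [h4]
    exact ih

theorem pvMainLemma (cs : List Char) (depth : Int) (buf : List Char) (decls : List String) :
    pvFin (cs.foldl pvAStep (decls, buf, none, false, depth)) =
      pvBOuter cs depth buf decls := by
  induction cs, depth, buf, decls using pvBOuter.induct with
  | case1 depth buf decls => simp [pvBOuter, pvFin]
  | case2 depth buf decls c rest hq p ih =>
    have hB : pvBOuter (c :: rest) depth buf decls =
        pvBOuter (pvBQuote c rest (buf ++ [c])).2 depth (pvBQuote c rest (buf ++ [c])).1 decls := by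
      rw [pvBOuter.eq_def]; simp [hq]
    have hs : pvAStep (decls, buf, none, false, depth) c =
        (decls, buf ++ [c], some c, false, depth) := by
      rcases hq with h | h <;> simp [pvAStep, h]
    rw [hB, List.foldl_cons, hs, pvQuoteLemma c rest (buf ++ [c]) decls depth]
    exact ih
  | case3 depth buf decls rest hq ih =>
    have hB : pvBOuter ('(' :: rest) depth buf decls =
        pvBOuter rest (depth + 1) (buf ++ ['(']) decls := by
      rw [pvBOuter.eq_def]; simp
    have hs : pvAStep (decls, buf, none, false, depth) '(' =
        (decls, buf ++ ['('], none, false, depth + 1) := by simp [pvAStep]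
    rw [hB, List.foldl_cons, hs]
    exact ih
  | case4 depth buf decls c rest hq h1 h2 ih =>
    have hB : pvBOuter (c :: rest) depth buf decls =
        pvBOuter rest (depth - 1) (buf ++ [c]) decls := by
      rw [pvBOuter.eq_def]; simp [hq, h1, h2]
    have hs : pvAStep (decls, buf, none, false, depth) c =
        (decls, buf ++ [c], none, false, depth - 1) := by
      simp [pvAStep, hq, h1, h2]
    rw [hB, List.foldl_cons, hs]
    exact ih
  | case5 depth buf decls c rest hq h1 h2 h3 ih =>
    have hB : pvBOuter (c :: rest) depth buf decls =
        pvBOuter rest depth [] (decls ++ [String.ofList buf]) := by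
      rw [pvBOuter.eq_def]; simp [hq, h1, h2, h3]
    have hs : pvAStep (decls, buf, none, false, depth) c =
        (decls ++ [String.ofList buf], [], none, false, depth) := by
      simp [pvAStep, hq, h1, h2, h3]
    rw [hB, List.foldl_cons, hs]
    exact ih
  | case6 depth buf decls c rest hq h1 h2 h3 ih =>
    have hB : pvBOuter (c :: rest) depth buf decls =
        pvBOuter rest depth (buf ++ [c]) decls := by
      rw [pvBOuter.eq_def]; simp [hq, h1, h2, h3]
    have hs : pvAStep (decls, buf, none, false, depth) c =
        (decls, buf ++ [c], none, false, depth) := by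
      simp [pvAStep, hq, h1, h2, h3]
    rw [hB, List.foldl_cons, hs]
    exact ih

-- ===== VERDICT (by name: the statement is the Claim_ definition above) =====
theorem split_css_declarations_py_spec : Claim_equal_split_css_declarations_py := by
  intro style _
  unfold Spec_split_css_declarations_py split_css_declarations_py split_css_declarations_py_alt
  exact pvMainLemma style.toList 0 [] []
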